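-- pv_equiv track=rewrite | github.com/Handonggon/coding_test | programmers/2level/잉규식 알고리즘/다음 큰 숫자.py | solution
-- ===== SOURCE A (Python) =====
-- def solution(n):
--     list_n = [i for i in bin(n)][2:]
--     change = False
--     for index in range(len(list_n)-2,-1,-1) :
--         if list_n[index] < list_n[index+1] :
--             temp = list_n[index]
--             list_n[index] = list_n[index+1]
--             list_n[index+1] = temp
--             change = True
--             break
--     if change :
--         list_n = list_n[:index+1] + sorted(list_n[index+1:])
--     else :
--         list_n.insert(1,'0')
--         list_n = [list_n[0]] + sorted(list_n[1:])
--     result = ''.join(map(str,(['0','b']+list_n)))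
--
--     return int(result,2)
-- ===== SOURCE B (Python) =====
-- def solution(n):
--     if n <= 0:
--         return 0
--     m = n
--     q = 0
--     while m % 2 == 0:
--         m //= 2
--         q += 1
--     k = 0
--     while m % 2 == 1:
--         m //= 2
--         k += 1
--     return ((m + 1) << (k + q)) + (1 << (k - 1)) - 1
-- ===== Notes on version B (the rewrite author's own statement) =====
-- stated objective: simpler
-- what changed: Replaces the binary-string build / right-to-left scan / swap / suffix sort with pure integer arithmetic: count trailing zero bits, then trailing one bits, by repeated halving, and return one closed-form shift-and-add expression; no list, string or sort is built.
import Mathlib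
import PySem

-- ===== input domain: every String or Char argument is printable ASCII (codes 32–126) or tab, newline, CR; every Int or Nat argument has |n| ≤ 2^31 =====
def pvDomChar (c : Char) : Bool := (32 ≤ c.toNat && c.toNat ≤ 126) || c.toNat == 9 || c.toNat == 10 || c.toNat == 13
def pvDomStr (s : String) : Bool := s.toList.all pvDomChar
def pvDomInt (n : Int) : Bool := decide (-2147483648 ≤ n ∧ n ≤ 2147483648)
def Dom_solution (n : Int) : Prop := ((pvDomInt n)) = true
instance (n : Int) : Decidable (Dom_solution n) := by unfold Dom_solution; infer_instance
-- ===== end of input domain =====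

-- B replaces A's binary-string build / right-to-left scan / swap / suffix sort by pure integer
-- arithmetic (strip trailing zeros and ones by halving, then one closed formula).

-- ===== PORT A =====

-- the 'for index in range(len-2,-1,-1): if l[index] < l[index+1]: … break' scan:
-- returns the largest index i with l[i] < l[i+1] (first hit counting down), none if no hit
def pvScanBack (l : List Char) : Option Nat :=
  match l with
  | a :: b :: t =>
    match pvScanBack (b :: t) with
    | some j => some (j + 1)
    | none => if a < b then some 0 else none
  | _ => none

-- int(s, 2) hand-ported for the one call site (s = "0b" + the digit chars built above): exact
-- there — value of the binary digits after the "0b" prefix, none exactly where Python raises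
-- ValueError (no digits, or a non-binary char such as the 'b' that survives for negative n)
def pvInt2? (l : List Char) : Option Int :=
  match l with
  | '0' :: 'b' :: ds =>
    if ds ≠ [] ∧ ds.all (fun c => c == '0' || c == '1') then
      some (ds.foldl (fun a c => 2 * a + (if c = '1' then 1 else 0)) 0)
    else none
  | _ => none

def solution (n : Int) : Int :=
  let list_n := (PySem.Int.toBinChars0b n).drop 2      -- [i for i in bin(n)][2:]
  let list_n2 :=
    match pvScanBack list_n with
    | some index =>                                    -- change = True, swap l[index], l[index+1]
      let temp := PySem.List.pyGetD list_n (index : Int) ' '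
      let l1 := PySem.List.pySetD list_n (index : Int) (PySem.List.pyGetD list_n ((index : Int) + 1) ' ')
      let l2 := PySem.List.pySetD l1 ((index : Int) + 1) temp
      PySem.List.slice l2 none (some ((index : Int) + 1)) ++
        PySem.List.sorted (PySem.List.slice l2 (some ((index : Int) + 1)) none) (fun x => x) false
    | none =>                                          -- change = False
      let li := PySem.List.insert list_n 1 '0'
      PySem.List.pyGetD li 0 ' ' :: PySem.List.sorted (PySem.List.slice li (some 1) none) (fun x => x) false
  (pvInt2? ('0' :: 'b' :: list_n2)).getD 0             -- int(''.join(['0','b']+list_n), 2)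

-- ===== PORT B =====

-- while m % 2 == 0: m //= 2; q += 1   (the 'm = 0' test only makes the recursion total;
-- the caller guarantees m ≥ 1, where Python's loop terminates too)
def pvEvens (m : Nat) : Nat × Nat :=
  if h : m ≠ 0 ∧ m % 2 = 0 then
    let r := pvEvens (m / 2); (r.1, r.2 + 1)
  else (m, 0)
decreasing_by exact Nat.div_lt_self (Nat.pos_of_ne_zero h.1) (by omega)

-- while m % 2 == 1: m //= 2; k += 1
def pvOnes (m : Nat) : Nat × Nat :=
  if h : m % 2 = 1 then
    let r := pvOnes (m / 2); (r.1, r.2 + 1)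
  else (m, 0)
decreasing_by exact Nat.div_lt_self (by omega) (by omega)

def solution_alt (n : Int) : Int :=
  if n ≤ 0 then 0
  else
    let p := pvEvens n.toNat                 -- (m after the zero-stripping loop, q)
    let p2 := pvOnes p.1                     -- (m after the one-stripping loop, k)
    (((p2.1 + 1) <<< (p2.2 + p.2) + (1 <<< (p2.2 - 1)) - 1 : Nat) : Int)

-- ===== PRECONDITION & SPEC =====
-- Pre_ excludes exactly the negative inputs, where A raises ValueError (bin(-k) leaves a 'b'
-- among the digit chars, so int(result, 2) fails).
def Pre_solution (n : Int) : Prop := 0 ≤ n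
instance (n : Int) : Decidable (Pre_solution n) := by unfold Pre_solution; infer_instance
def pvWitness_solution : Int := (6)

def Spec_solution (n : Int) (out : Int) : Prop := out = solution_alt n
instance (n : Int) (out : Int) : Decidable (Spec_solution n out) := by unfold Spec_solution; infer_instance

-- ===== CLAIM (what is proved, stated in full; the proofs are below) =====
def Claim_equal_solution : Prop := ∀ (n : Int), Dom_solution n → Pre_solution n → Spec_solution n (solution n)

-- ===== LEMMAS AND PROOFS =====

-- binary digit chars of m, MSB first ([] for m = 0); equals Nat.toDigits 2 m for m ≠ 0
def pvBits (m : Nat) : List Char :=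
  if h : m = 0 then [] else pvBits (m / 2) ++ [if m % 2 = 1 then '1' else '0']
decreasing_by exact Nat.div_lt_self (Nat.pos_of_ne_zero h) (by omega)

lemma pvBits_zero : pvBits 0 = [] := by unfold pvBits; simp

lemma pvBits_two_mul (m : Nat) (h : m ≠ 0) : pvBits (2 * m) = pvBits m ++ ['0'] := by
  rw [pvBits]; simp [h, Nat.mul_div_cancel_left m (by norm_num : 0 < 2), Nat.mul_mod_right]

lemma pvBits_two_mul_add_one (m : Nat) : pvBits (2 * m + 1) = pvBits m ++ ['1'] := by
  have hd : (2 * m + 1) / 2 = m := by omega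
  have hm : (2 * m + 1) % 2 = 1 := by omega
  rw [pvBits]
  simp [hd, hm]

lemma pvBits_mul_pow (y q : Nat) (hy : y ≠ 0) :
    pvBits (y * 2 ^ q) = pvBits y ++ List.replicate q '0' := by
  induction q with
  | zero => simp
  | succ q ih =>
    have : y * 2 ^ (q + 1) = 2 * (y * 2 ^ q) := by ring
    rw [this, pvBits_two_mul _ (by positivity), ih, List.replicate_succ']
    simp

lemma pvBits_ones (P k : Nat) :
    pvBits (2 * P * 2 ^ k + (2 ^ k - 1)) = pvBits (2 * P) ++ List.replicate k '1' := by
  induction k with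
  | zero => simp
  | succ k ih =>
    have h1 : (1 : Nat) ≤ 2 ^ k := Nat.one_le_two_pow
    have e : 2 * P * 2 ^ (k + 1) = 2 * (2 * P * 2 ^ k) := by rw [pow_succ]; ring
    have e2 : 2 ^ (k + 1) = 2 * 2 ^ k := by rw [pow_succ]; ring
    have : 2 * P * 2 ^ (k + 1) + (2 ^ (k + 1) - 1)
         = 2 * (2 * P * 2 ^ k + (2 ^ k - 1)) + 1 := by omega
    rw [this, pvBits_two_mul_add_one, ih, List.replicate_succ']
    simp

-- bridge to core's Nat.toDigits (what PySem.Int.toBinChars0b uses)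
lemma toDigitsCore_eq (f : Nat) :
    ∀ (n : Nat) (l : List Char), n ≠ 0 → n ≤ f → Nat.toDigitsCore 2 f n l = pvBits n ++ l := by
  induction f with
  | zero => intro n l h hf; omega
  | succ f ih =>
    intro n l h hf
    rw [Nat.toDigitsCore]
    by_cases h2 : n / 2 = 0
    · have hn1 : n = 1 := by omega
      subst hn1
      rw [pvBits]
      norm_num [pvBits_zero, Nat.digitChar]
    · simp only [h2, if_false]
      rw [ih (n / 2) _ h2 (by omega)]
      conv_rhs => rw [pvBits]
      simp only [h, dite_false]
      have : (n % 2).digitChar = if n % 2 = 1 then '1' else '0' := by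
        rcases Nat.mod_two_eq_zero_or_one n with h0 | h0 <;> simp [h0, Nat.digitChar]
      rw [this, List.append_assoc]
      rfl

lemma toDigits_two_eq (n : Nat) (h : n ≠ 0) : Nat.toDigits 2 n = pvBits n := by
  have := toDigitsCore_eq (n + 1) n [] h (by omega)
  simpa [Nat.toDigits] using this

lemma pvBits_binary (m : Nat) : ∀ c ∈ pvBits m, c = '0' ∨ c = '1' := by
  induction m using Nat.strong_induction_on with
  | _ m ih =>
    by_cases h : m = 0
    · subst h; rw [pvBits_zero]; simp
    · rw [pvBits]
      simp only [h, dite_false]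
      intro c hc
      rcases List.mem_append.mp hc with hc | hc
      · exact ih (m / 2) (Nat.div_lt_self (Nat.pos_of_ne_zero h) (by omega)) c hc
      · simp at hc; split_ifs at hc <;> simp [hc]

-- ---- the scan ----

lemma pvScanBack_none_of_chain :
    ∀ l : List Char, List.IsChain (fun a b => ¬ a < b) l → pvScanBack l = none := by
  intro l
  induction l with
  | nil => intro _; rfl
  | cons a t ih =>
    intro h
    cases t with
    | nil => rfl
    | cons b t' =>
      have hab : ¬ a < b := (List.isChain_cons_cons.mp h).1
      have := ih (List.isChain_cons_cons.mp h).2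
      simp [pvScanBack, this, hab]

lemma chain_ones_zeros (k q : Nat) :
    List.IsChain (fun a b : Char => ¬ a < b) (List.replicate k '1' ++ List.replicate q '0') := by
  induction k with
  | zero =>
    simp only [List.replicate, List.nil_append]
    exact List.isChain_replicate_of_rel q (by decide)
  | succ k ih =>
    rw [List.replicate_succ, List.cons_append]
    apply ih.cons
    intro y hy
    cases k with
    | zero =>
      cases q with
      | zero => simp at hy
      | succ q =>
        simp [List.replicate_succ] at hy
        subst hy; decide
    | succ k =>
      simp [List.replicate_succ] at hy
      subst hy; decide

lemma pvScanBack_found (k q : Nat) (hk : 1 ≤ k) :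
    pvScanBack ('0' :: (List.replicate k '1' ++ List.replicate q '0')) = some 0 := by
  obtain ⟨k', rfl⟩ : ∃ k', k = k' + 1 := ⟨k - 1, by omega⟩
  rw [List.replicate_succ, List.cons_append]
  have hnone : pvScanBack ('1' :: (List.replicate k' '1' ++ List.replicate q '0')) = none := by
    have := chain_ones_zeros (k' + 1) q
    rw [List.replicate_succ, List.cons_append] at this
    exact pvScanBack_none_of_chain _ this
  simp [pvScanBack, hnone]

lemma pvScanBack_prepend (c M : List Char) (j : Nat) (h : pvScanBack M = some j) :
    pvScanBack (c ++ M) = some (c.length + j) := by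
  induction c with
  | nil => simpa using h
  | cons x c' ih =>
    have hM : ∃ a b t, M = a :: b :: t := by
      cases M with
      | nil => simp [pvScanBack] at h
      | cons a t =>
        cases t with
        | nil => simp [pvScanBack] at h
        | cons b t' => exact ⟨a, b, t', rfl⟩
    obtain ⟨a, b, t, rfl⟩ := hM
    cases hc : c' ++ a :: b :: t with
    | nil => simp at hc
    | cons y t' =>
      have : pvScanBack (x :: c' ++ a :: b :: t) = some (c'.length + j + 1) := by
        rw [List.cons_append, hc, pvScanBack]
        rw [← hc, ih]
      simpa [Nat.add_assoc, Nat.add_comm j 1, Nat.add_left_comm] using this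

-- ---- sorted on two-valued lists ----

lemma sorted_zeros_ones (a b : Nat) :
    PySem.List.sorted ('0' :: (List.replicate a '1' ++ List.replicate b '0')) (fun x => x) false
      = List.replicate (b + 1) '0' ++ List.replicate a '1' := by
  apply PySem.List.sorted_id_eq_of_perm_of_pairwise
  · rw [List.replicate_succ, List.cons_append]
    exact List.Perm.cons '0' List.perm_append_comm
  · apply List.pairwise_append.mpr
    refine ⟨?_, ?_, ?_⟩
    · exact List.pairwise_replicate.mpr (Or.inr le_rfl)
    · exact List.pairwise_replicate.mpr (Or.inr le_rfl)
    · intro x hx y hy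
      rw [List.eq_of_mem_replicate hx, List.eq_of_mem_replicate hy]
      decide

-- ---- value of a digit-char list ----

def pvVal (l : List Char) : Nat := l.foldl (fun a c => 2 * a + (if c = '1' then 1 else 0)) 0

lemma pvVal_foldl_shift (l : List Char) :
    ∀ a : Nat, l.foldl (fun a c => 2 * a + (if c = '1' then 1 else 0)) a = a * 2 ^ l.length + pvVal l := by
  induction l with
  | nil => intro a; simp [pvVal]
  | cons c t ih =>
    intro a
    simp only [List.foldl_cons, List.length_cons, pvVal]
    rw [ih (2 * a + _), ih (2 * 0 + _)]
    ring

lemma pvVal_append (l₁ l₂ : List Char) :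
    pvVal (l₁ ++ l₂) = pvVal l₁ * 2 ^ l₂.length + pvVal l₂ := by
  unfold pvVal
  rw [List.foldl_append, pvVal_foldl_shift l₂]
  rfl

lemma pvVal_zeros (q : Nat) : pvVal (List.replicate q '0') = 0 := by
  induction q with
  | zero => rfl
  | succ q ih => rw [List.replicate_succ' (n := q), pvVal_append, ih]; simp [pvVal]

lemma pvVal_ones (k : Nat) : pvVal (List.replicate k '1') = 2 ^ k - 1 := by
  induction k with
  | zero => rfl
  | succ k ih =>
    rw [List.replicate_succ' (n := k), pvVal_append, ih]
    have : (1:Nat) ≤ 2 ^ k := Nat.one_le_two_pow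
    simp [pvVal]
    omega

lemma pvVal_pvBits (m : Nat) : pvVal (pvBits m) = m := by
  induction m using Nat.strong_induction_on with
  | _ m ih =>
    by_cases h : m = 0
    · subst h; rw [pvBits_zero]; rfl
    · rw [pvBits]
      simp only [h, dite_false]
      rw [pvVal_append, ih (m / 2) (Nat.div_lt_self (Nat.pos_of_ne_zero h) (by omega))]
      rcases Nat.mod_two_eq_zero_or_one m with h0 | h0 <;> simp [pvVal, h0] <;> omega

lemma pvValInt (ds : List Char) :
    ∀ a : Nat, ds.foldl (fun (x : Int) c => 2 * x + (if c = '1' then 1 else 0)) (a : Int)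
      = ((ds.foldl (fun (x : Nat) c => 2 * x + (if c = '1' then 1 else 0)) a : Nat) : Int) := by
  induction ds with
  | nil => intro a; simp
  | cons c t ih =>
    intro a
    simp only [List.foldl_cons]
    have : (2 * (a : Int) + (if c = '1' then 1 else 0))
         = ((2 * a + (if c = '1' then 1 else 0) : Nat) : Int) := by
      split_ifs <;> push_cast <;> ring
    rw [this, ih]

lemma pvInt2?_eval (ds : List Char) (hne : ds ≠ []) (hb : ∀ c ∈ ds, c = '0' ∨ c = '1') :
    pvInt2? ('0' :: 'b' :: ds) = some ((pvVal ds : Nat) : Int) := by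
  have hall : ds.all (fun c => c == '0' || c == '1') = true := by
    rw [List.all_eq_true]; intro c hc
    rcases hb c hc with h | h <;> simp [h]
  simp only [pvInt2?, hne, hall, ne_eq, not_false_iff, true_and, if_true]
  congr 1
  have := pvValInt ds 0
  norm_num at this
  rw [this]
  rfl

-- ---- helpers for the two loops of B ----

lemma pvEvens_spec (y q : Nat) (hy : y % 2 = 1) : pvEvens (y * 2 ^ q) = (y, q) := by
  induction q with
  | zero =>
    rw [pvEvens]
    simp [hy]
  | succ q ih =>
    have e : y * 2 ^ (q + 1) = (y * 2 ^ q) * 2 := by rw [pow_succ]; ring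
    have hy1 : 1 ≤ y := by omega
    have hq1 : 1 ≤ 2 ^ q := Nat.one_le_two_pow
    have hne : y * 2 ^ (q + 1) ≠ 0 := by
      rw [e]; positivity
    have hmod : (y * 2 ^ (q + 1)) % 2 = 0 := by rw [e]; omega
    rw [pvEvens]
    simp only [hne, hmod, ne_eq, not_false_iff, and_self, dite_true]
    have hdiv : y * 2 ^ (q + 1) / 2 = y * 2 ^ q := by rw [e]; omega
    rw [hdiv, ih]

lemma pvOnes_spec (P k : Nat) : pvOnes (2 * P * 2 ^ k + (2 ^ k - 1)) = (2 * P, k) := by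
  induction k with
  | zero =>
    rw [pvOnes]
    simp [Nat.mul_mod_right]
  | succ k ih =>
    have h1 : (1 : Nat) ≤ 2 ^ k := Nat.one_le_two_pow
    have e : 2 * P * 2 ^ (k + 1) = 2 * (2 * P * 2 ^ k) := by rw [pow_succ]; ring
    have e2 : 2 ^ (k + 1) = 2 * 2 ^ k := by rw [pow_succ]; ring
    have hval : 2 * P * 2 ^ (k + 1) + (2 ^ (k + 1) - 1)
              = 2 * (2 * P * 2 ^ k + (2 ^ k - 1)) + 1 := by omega
    rw [hval, pvOnes]
    simp only [Nat.mul_add_mod, dite_true]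
    have hdiv : (2 * (2 * P * 2 ^ k + (2 ^ k - 1)) + 1) / 2 = 2 * P * 2 ^ k + (2 ^ k - 1) :=
      by omega
    rw [hdiv, ih]

-- ---- closed forms ----

-- value both programs return on n = (2P·2^k + 2^k−1)·2^q  (k ≥ 1)
def pvOut (P k q : Nat) : Nat := (2 * P + 1) * 2 ^ (k + q) + (2 ^ (k - 1) - 1)

lemma B_closed (P k q : Nat) (hk : 1 ≤ k) :
    solution_alt (((2 * P * 2 ^ k + (2 ^ k - 1)) * 2 ^ q : Nat) : Int) = (pvOut P k q : Int) := by
  have h1 : (1 : Nat) ≤ 2 ^ k := Nat.one_le_two_pow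
  have hodd : (2 * P * 2 ^ k + (2 ^ k - 1)) % 2 = 1 := by
    obtain ⟨k', rfl⟩ : ∃ k', k = k' + 1 := ⟨k - 1, by omega⟩
    have h2 : (1 : Nat) ≤ 2 ^ k' := Nat.one_le_two_pow
    have e : 2 * P * 2 ^ (k' + 1) = 2 * (2 * P * 2 ^ k') := by rw [pow_succ]; ring
    have e2 : 2 ^ (k' + 1) = 2 * 2 ^ k' := by rw [pow_succ]; ring
    omega
  have hq1 : (1 : Nat) ≤ 2 ^ q := Nat.one_le_two_pow
  have hNpos : (0 : Nat) < (2 * P * 2 ^ k + (2 ^ k - 1)) * 2 ^ q := by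
    have : 1 ≤ 2 * P * 2 ^ k + (2 ^ k - 1) := by omega
    calc 0 < 1 * 1 := by omega
    _ ≤ (2 * P * 2 ^ k + (2 ^ k - 1)) * 2 ^ q := Nat.mul_le_mul this hq1
  have hn : ¬ ((((2 * P * 2 ^ k + (2 ^ k - 1)) * 2 ^ q : Nat) : Int) ≤ 0) := by
    rw [Int.not_le]
    exact_mod_cast hNpos
  unfold solution_alt
  rw [if_neg hn]
  simp only [Int.toNat_natCast]
  rw [pvEvens_spec _ _ hodd, pvOnes_spec]
  simp only [Nat.shiftLeft_eq, pvOut]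
  congr 1
  have h3 : (1 : Nat) ≤ 2 ^ (k - 1) := Nat.one_le_two_pow
  omega

lemma A_closed (P k q : Nat) (hk : 1 ≤ k) :
    solution (((2 * P * 2 ^ k + (2 ^ k - 1)) * 2 ^ q : Nat) : Int) = (pvOut P k q : Int) := by
  obtain ⟨k', rfl⟩ : ∃ k', k = k' + 1 := ⟨k - 1, by omega⟩
  have h2 : (2 : Nat) ≤ 2 ^ (k' + 1) := by
    have := Nat.one_le_two_pow (n := k'); rw [pow_succ]; omega
  have hyne : 2 * P * 2 ^ (k' + 1) + (2 ^ (k' + 1) - 1) ≠ 0 := by omega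
  have hq1 : (1 : Nat) ≤ 2 ^ q := Nat.one_le_two_pow
  have hNne : (2 * P * 2 ^ (k' + 1) + (2 ^ (k' + 1) - 1)) * 2 ^ q ≠ 0 :=
    Nat.mul_ne_zero hyne (by omega)
  have hbits : pvBits ((2 * P * 2 ^ (k' + 1) + (2 ^ (k' + 1) - 1)) * 2 ^ q)
      = pvBits (2 * P) ++ ('1' :: (List.replicate k' '1' ++ List.replicate q '0')) := by
    rw [pvBits_mul_pow _ q hyne, pvBits_ones, List.append_assoc,
        List.replicate_succ, List.cons_append]
  have hdrop : (PySem.Int.toBinChars0b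
      ((((2 * P * 2 ^ (k' + 1) + (2 ^ (k' + 1) - 1)) * 2 ^ q : Nat)) : Int)).drop 2
      = pvBits ((2 * P * 2 ^ (k' + 1) + (2 ^ (k' + 1) - 1)) * 2 ^ q) := by
    have hnn : ¬ ((((2 * P * 2 ^ (k' + 1) + (2 ^ (k' + 1) - 1)) * 2 ^ q : Nat) : Int) < 0) :=
      Int.not_lt.mpr (Int.natCast_nonneg _)
    rw [PySem.Int.toBinChars0b, if_neg hnn]
    simp only [Int.toNat_natCast, List.drop_succ_cons, List.drop_zero]
    exact toDigits_two_eq _ hNne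
  simp only [solution]
  rw [hdrop, hbits]
  by_cases hP : P = 0
  · -- no '01' pair: the else branch (change = False)
    subst hP
    rw [show (2 : Nat) * 0 = 0 from rfl, pvBits_zero, List.nil_append]
    have hscan : pvScanBack ('1' :: (List.replicate k' '1' ++ List.replicate q '0')) = none := by
      have := chain_ones_zeros (k' + 1) q
      rw [List.replicate_succ, List.cons_append] at this
      exact pvScanBack_none_of_chain _ this
    rw [hscan]
    have hins : PySem.List.insert ('1' :: (List.replicate k' '1' ++ List.replicate q '0')) 1 '0'
        = '1' :: '0' :: (List.replicate k' '1' ++ List.replicate q '0') := by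
      rw [PySem.List.insert_ofNat _ 1 '0' (by simp)]
      simp
    have hsl : PySem.List.slice ('1' :: '0' :: (List.replicate k' '1' ++ List.replicate q '0'))
        (some 1) = '0' :: (List.replicate k' '1' ++ List.replicate q '0') := by
      rw [PySem.List.slice_from _ (by norm_num : (0 : Int) ≤ 1)]
      simp
    simp only [hins, PySem.List.pyGetD_zero_cons, hsl, sorted_zeros_ones k' q]
    have hval : pvInt2? ('0' :: 'b' ::
        ('1' :: (List.replicate (q + 1) '0' ++ List.replicate k' '1')))
        = some ((pvVal ('1' :: (List.replicate (q + 1) '0' ++ List.replicate k' '1')) : Nat)) := by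
      apply pvInt2?_eval _ (by simp)
      intro c hc
      simp only [List.mem_cons, List.mem_append] at hc
      rcases hc with h | h | h
      · right; exact h
      · left; exact List.eq_of_mem_replicate h
      · right; exact List.eq_of_mem_replicate h
    rw [hval]
    have hv : pvVal ('1' :: (List.replicate (q + 1) '0' ++ List.replicate k' '1'))
        = pvOut 0 (k' + 1) q := by
      have e1 : ('1' :: (List.replicate (q + 1) '0' ++ List.replicate k' '1'))
          = ['1'] ++ (List.replicate (q + 1) '0' ++ List.replicate k' '1') := rfl
      rw [e1, pvVal_append, pvVal_append, pvVal_zeros, pvVal_ones]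
      have hv1 : pvVal ['1'] = 1 := rfl
      simp only [List.length_append, List.length_replicate, pvOut, hv1, one_mul,
        zero_mul, zero_add, Nat.add_sub_cancel]
      rw [show q + 1 + k' = k' + 1 + q from by omega]
      norm_num
    rw [hv]
    simp
  · -- the rightmost '01' pair is swapped (change = True)
    have hP2 : pvBits (2 * P) = pvBits P ++ ['0'] := pvBits_two_mul P hP
    rw [hP2, List.append_assoc, List.singleton_append]
    set B := pvBits P with hB
    set Y := List.replicate k' '1' ++ List.replicate q '0' with hYdef
    have hfound : pvScanBack ('0' :: '1' :: Y) = some 0 := by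
      have := pvScanBack_found (k' + 1) q (by omega)
      rwa [List.replicate_succ, List.cons_append] at this
    have hscan : pvScanBack (B ++ '0' :: '1' :: Y) = some B.length := by
      have := pvScanBack_prepend B _ 0 hfound
      simpa using this
    rw [hscan]
    have hcast2 : ((B.length : Nat) : Int) + 1 = (((B.length + 1 : Nat)) : Int) := by
      push_cast; ring
    have hg1 : PySem.List.pyGetD (B ++ '0' :: '1' :: Y) ((B.length : Nat) : Int) ' ' = '0' := by
      rw [PySem.List.pyGetD_natCast, List.getD_append_right _ _ _ _ (by omega)]
      simp
    have hg2 : PySem.List.pyGetD (B ++ '0' :: '1' :: Y) (((B.length : Nat) : Int) + 1) ' ' = '1' := by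
      rw [hcast2, PySem.List.pyGetD_natCast, List.getD_append_right _ _ _ _ (by omega)]
      simp [show B.length + 1 - B.length = 1 from by omega]
    have hset1 : PySem.List.pySetD (B ++ '0' :: '1' :: Y) ((B.length : Nat) : Int) '1'
        = B ++ '1' :: '1' :: Y := by
      rw [PySem.List.pySetD_natCast, List.set_append_right _ _ (by omega)]
      simp
    have hset2 : PySem.List.pySetD (B ++ '1' :: '1' :: Y) (((B.length : Nat) : Int) + 1) '0'
        = B ++ '1' :: '0' :: Y := by
      rw [hcast2, PySem.List.pySetD_natCast, List.set_append_right _ _ (by omega)]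
      simp [show B.length + 1 - B.length = 1 from by omega]
    have htake : PySem.List.slice (B ++ '1' :: '0' :: Y) none (some (((B.length : Nat) : Int) + 1))
        = B ++ ['1'] := by
      rw [hcast2, PySem.List.slice_to_natCast, List.take_length_add_append 1]
      rfl
    have hdrop2 : PySem.List.slice (B ++ '1' :: '0' :: Y) (some (((B.length : Nat) : Int) + 1))
        = '0' :: Y := by
      rw [hcast2, PySem.List.slice_from_natCast, List.drop_length_add_append 1]
      rfl
    have hsort : PySem.List.sorted ('0' :: Y) (fun x => x) false
        = List.replicate (q + 1) '0' ++ List.replicate k' '1' := by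
      rw [hYdef]; exact sorted_zeros_ones k' q
    simp only [hg1, hg2, hset1, hset2, htake, hdrop2, hsort]
    have hval : pvInt2? ('0' :: 'b' ::
        ((B ++ ['1']) ++ (List.replicate (q + 1) '0' ++ List.replicate k' '1')))
        = some ((pvVal ((B ++ ['1']) ++ (List.replicate (q + 1) '0' ++ List.replicate k' '1')) : Nat)) := by
      apply pvInt2?_eval _ (by simp)
      intro c hc
      simp only [List.mem_append, List.mem_cons,
        List.not_mem_nil, or_false] at hc
      rcases hc with (h | h) | (h | h)
      · exact pvBits_binary P c h
      · right; exact h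
      · left; exact List.eq_of_mem_replicate h
      · right; exact List.eq_of_mem_replicate h
    rw [hval]
    have hv : pvVal ((B ++ ['1']) ++ (List.replicate (q + 1) '0' ++ List.replicate k' '1'))
        = pvOut P (k' + 1) q := by
      rw [pvVal_append, pvVal_append, pvVal_append, pvVal_zeros, pvVal_ones, hB, pvVal_pvBits]
      have hv1 : pvVal ['1'] = 1 := rfl
      simp only [List.length_append, List.length_replicate,
        List.length_cons, List.length_nil, pvOut, hv1, pow_one, zero_mul, zero_add,
        Nat.add_sub_cancel]
      rw [show q + 1 + k' = k' + 1 + q from by omega]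
      have e : (P * 2 + 1) * 2 ^ (k' + 1 + q) = (2 * P + 1) * 2 ^ (k' + 1 + q) := by ring
      omega
    rw [hv]
    simp

-- ---- decomposition ----

lemma decomp_odd (v : Nat) (hv : v % 2 = 1) :
    ∃ P k, 1 ≤ k ∧ v = 2 * P * 2 ^ k + (2 ^ k - 1) := by
  induction v using Nat.strong_induction_on with
  | _ v ih =>
    obtain ⟨w, rfl⟩ : ∃ w, v = 2 * w + 1 := ⟨v / 2, by omega⟩
    rcases Nat.mod_two_eq_zero_or_one w with hw | hw
    · obtain ⟨P, rfl⟩ : ∃ P, w = 2 * P := ⟨w / 2, by omega⟩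
      exact ⟨P, 1, le_rfl, by norm_num; ring⟩
    · obtain ⟨P, k, hk, hwk⟩ := ih w (by omega) hw
      refine ⟨P, k + 1, by omega, ?_⟩
      have h1 : (1 : Nat) ≤ 2 ^ k := Nat.one_le_two_pow
      have e : 2 * P * 2 ^ (k + 1) = 2 * (2 * P * 2 ^ k) := by rw [pow_succ]; ring
      have e2 : 2 ^ (k + 1) = 2 * 2 ^ k := by rw [pow_succ]; ring
      omega

lemma decomp (N : Nat) (hN : 1 ≤ N) :
    ∃ P k q, 1 ≤ k ∧ N = (2 * P * 2 ^ k + (2 ^ k - 1)) * 2 ^ q := by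
  induction N using Nat.strong_induction_on with
  | _ N ih =>
    rcases Nat.mod_two_eq_zero_or_one N with hN2 | hN2
    · obtain ⟨M, rfl⟩ : ∃ M, N = 2 * M := ⟨N / 2, by omega⟩
      obtain ⟨P, k, q, hk, hM⟩ := ih M (by omega) (by omega)
      exact ⟨P, k, q + 1, hk, by rw [hM, pow_succ]; ring⟩
    · obtain ⟨P, k, hk, hv⟩ := decomp_odd N hN2
      exact ⟨P, k, 0, hk, by simpa using hv⟩

-- ===== VERDICT (by name: the statement is the Claim_ definition above) =====
theorem solution_spec : Claim_equal_solution := by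
  intro n _ hpre
  unfold Spec_solution
  rcases eq_or_lt_of_le hpre with h0 | hpos
  · rw [← h0]; decide
  · have hN : 1 ≤ n.toNat := by omega
    obtain ⟨P, k, q, hk, hdec⟩ := decomp n.toNat hN
    have hn : n = ((((2 * P * 2 ^ k + (2 ^ k - 1)) * 2 ^ q : Nat)) : Int) := by
      rw [← hdec]; omega
    rw [hn, A_closed P k q hk, B_closed P k q hk]
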